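-- pv_equiv track=rewrite | github.com/Tomusss/programowanie | lista4/zad2.py | sortowanie_zliczanie
-- ===== SOURCE A (Python) =====
-- def sortowanie_zliczanie(lista, klucze):
--     pozycje = {}
--     wystąpienia = {}
--
--     for x in klucze:
--         wystąpienia[x] = 0
--     for elem in lista:
--         wystąpienia[elem] += 1
--     for elem in klucze:
--         if wystąpienia[elem] == 0:
--             wystąpienia.__delitem__(elem)
--
--     ile_wystapien = 0
--     for elem in wystąpienia:
--         pozycje[elem] = ile_wystapien
--         ile_wystapien += wystąpienia[elem]
--
--     postortowana = [0 for x in range(0,len(lista))]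
--     for elem in lista:
--         postortowana[pozycje[elem]] = elem
--         pozycje[elem] += 1
--
--     return postortowana
-- ===== SOURCE B (Python) =====
-- def sortowanie_zliczanie(lista, klucze):
--     wystąpienia = {}
--     for x in klucze:
--         wystąpienia[x] = 0
--     for elem in lista:
--         wystąpienia[elem] += 1
--     for elem in klucze:
--         if wystąpienia[elem] == 0:
--             wystąpienia.__delitem__(elem)
--     # no pozycje table, no prefix sums, no preallocated array, no indexed
--     # scatter: emit each key (insertion order) repeated by its count
--     postortowana = []
--     for elem in wystąpienia:
--         postortowana.extend([elem] * wystąpienia[elem])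
--     return postortowana
-- ===== Notes on version B (the rewrite author's own statement) =====
-- stated objective: simpler
-- what changed: B keeps A's counting dict but deletes the whole placement phase: instead of building a pozycje prefix-sum table, preallocating a zero array and scattering each element by index with per-element position updates, it directly extends the output with each key repeated by its count, iterating the counts dict in insertion order.
import Mathlib
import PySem

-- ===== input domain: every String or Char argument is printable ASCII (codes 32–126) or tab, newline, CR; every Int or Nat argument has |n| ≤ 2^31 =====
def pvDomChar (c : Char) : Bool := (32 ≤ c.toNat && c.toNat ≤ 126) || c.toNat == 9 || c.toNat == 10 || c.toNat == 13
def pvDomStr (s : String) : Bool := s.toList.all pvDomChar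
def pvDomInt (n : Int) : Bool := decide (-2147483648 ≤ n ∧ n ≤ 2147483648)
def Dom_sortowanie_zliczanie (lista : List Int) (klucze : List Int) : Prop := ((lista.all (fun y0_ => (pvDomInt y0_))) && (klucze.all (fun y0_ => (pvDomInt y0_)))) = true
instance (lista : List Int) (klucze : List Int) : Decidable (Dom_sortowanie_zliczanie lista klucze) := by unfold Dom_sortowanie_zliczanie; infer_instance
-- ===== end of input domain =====

-- B keeps A's counting loops but replaces the pozycje prefix-sum table, the zero-filled
-- array and the indexed scatter by directly emitting each key repeated by its count.


-- ===== PORT A =====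
def sortowanie_zliczanie (lista : List Int) (klucze : List Int) : List Int :=
  -- wystąpienia[x] = 0 for x in klucze
  let w0 : PySem.Dict Int Int := klucze.foldl (fun d x => d.insert x 0) PySem.Dict.empty
  -- wystąpienia[elem] += 1  (the KeyError on elem ∉ klucze is excluded by Pre_; getD is exact on present keys)
  let w1 : PySem.Dict Int Int := lista.foldl (fun d e => d.insert e (d.getD e 0 + 1)) w0
  -- delete zero-count keys (the KeyError on a repeated zero-count key is excluded by Pre_)
  let w2 : PySem.Dict Int Int := klucze.foldl (fun d e => if d.getD e 0 == 0 then d.erase e else d) w1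
  -- pozycje: prefix sums, iterating wystąpienia in insertion order
  let pz : PySem.Dict Int Int × Int :=
    w2.keys.foldl (fun st e => (st.1.insert e st.2, st.2 + w2.getD e 0)) (PySem.Dict.empty, 0)
  -- postortowana = [0 for x in range(0, len(lista))], then the indexed scatter
  let init : List Int := (PySem.List.pyRange 0 (lista.length : Int) 1).map (fun _ => (0 : Int))
  let res : List Int × PySem.Dict Int Int :=
    lista.foldl (fun st e =>
      (PySem.List.pySetD st.1 (st.2.getD e 0) e, st.2.insert e (st.2.getD e 0 + 1))) (init, pz.1)
  res.1

-- ===== PORT B =====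
def sortowanie_zliczanie_alt (lista : List Int) (klucze : List Int) : List Int :=
  -- same three counting loops as A (same KeyErrors, excluded by Pre_) ...
  let w0 : PySem.Dict Int Int := klucze.foldl (fun d x => d.insert x 0) PySem.Dict.empty
  let w1 : PySem.Dict Int Int := lista.foldl (fun d e => d.insert e (d.getD e 0 + 1)) w0
  let w2 : PySem.Dict Int Int := klucze.foldl (fun d e => if d.getD e 0 == 0 then d.erase e else d) w1
  -- ... then emit each key repeated by its count, in dict insertion order
  w2.keys.foldl (fun out elem => out ++ List.replicate (w2.getD elem 0).toNat elem) []

-- ===== PRECONDITION & SPEC =====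
-- Pre_ excludes exactly the inputs where the Python A raises KeyError: an element of
-- lista absent from klucze, or a repeated key of klucze that never occurs in lista.
def Pre_sortowanie_zliczanie (lista : List Int) (klucze : List Int) : Prop :=
  (∀ x ∈ lista, x ∈ klucze) ∧ (∀ k ∈ klucze, klucze.count k ≤ 1 ∨ k ∈ lista)
instance (lista : List Int) (klucze : List Int) : Decidable (Pre_sortowanie_zliczanie lista klucze) := by
  unfold Pre_sortowanie_zliczanie; infer_instance
def pvWitness_sortowanie_zliczanie : List Int × List Int := ([2, 1, 2], [1, 2, 3])

def Spec_sortowanie_zliczanie (lista : List Int) (klucze : List Int) (out : List Int) : Prop := out = sortowanie_zliczanie_alt lista klucze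
instance (lista : List Int) (klucze : List Int) (out : List Int) : Decidable (Spec_sortowanie_zliczanie lista klucze out) := by unfold Spec_sortowanie_zliczanie; infer_instance

-- ===== CLAIM (what is proved, stated in full; the proofs are below) =====
def Claim_equal_sortowanie_zliczanie : Prop := ∀ (lista : List Int) (klucze : List Int), Dom_sortowanie_zliczanie lista klucze → Pre_sortowanie_zliczanie lista klucze → Spec_sortowanie_zliczanie lista klucze (sortowanie_zliczanie lista klucze)

-- ===== LEMMAS AND PROOFS =====

-- block picture of the partially scattered output array: for each key (in order) its
-- finished prefix followed by the still-unwritten zeros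
def pvBlockform (ks : List Int) (c d : Int → Nat) : List Int :=
  ks.flatMap (fun k => List.replicate (d k) k ++ List.replicate (c k - d k) (0 : Int))

-- start position of a key's block (sum of the earlier keys' counts)
def pvStartpos (ks : List Int) (c : Int → Nat) (e : Int) : Nat :=
  match ks with
  | [] => 0
  | k :: t => if k = e then 0 else c k + pvStartpos t c e

-- Int-valued prefix sums as A's pozycje loop computes them
def pvIpos (ks : List Int) (v : Int → Int) (e : Int) : Int :=
  match ks with
  | [] => 0
  | k :: t => if k = e then 0 else v k + pvIpos t v e

theorem pv_contains_eq (s : List Int) (x : Int) : PySem.Set.contains s x = decide (x ∈ s) := by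
  by_cases h : x ∈ s <;> simp [PySem.Set.contains, h]

theorem pv_add_mem {s : List Int} {x : Int} (h : x ∈ s) : PySem.Set.add s x = s := by
  simp [PySem.Set.add, pv_contains_eq, h]

theorem pv_add_not_mem {s : List Int} {x : Int} (h : x ∉ s) : PySem.Set.add s x = s ++ [x] := by
  simp [PySem.Set.add, pv_contains_eq, h]

theorem pv_w0_items (kl : List Int) (d : PySem.Dict Int Int) (S : List Int)
    (hd : d.items = S.map (fun k => (k, (0 : Int)))) (hS : S.Nodup) :
    (kl.foldl (fun d x => d.insert x 0) d).items
      = (PySem.Set.update S kl).map (fun k => (k, (0 : Int))) := by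
  induction kl generalizing d S with
  | nil => simpa [PySem.Set.update] using hd
  | cons x t ih =>
    have hkeys : d.keys = S := by simp [PySem.Dict.keys, hd, Function.comp_def]
    simp only [List.foldl_cons]
    by_cases hmem : x ∈ S
    · have hc : d.contains x = true := by
        rw [PySem.Dict.contains_iff_mem_keys, hkeys]; exact hmem
      have hins : (d.insert x (0 : Int)).items = S.map (fun k => (k, (0 : Int))) := by
        rw [PySem.Dict.items_insert_of_contains d 0 hc, hd, List.map_map]
        refine List.map_congr_left ?_
        intro k hk
        by_cases hkx : k = x <;> simp [hkx]
      rw [ih _ _ hins hS]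
      congr 1
      simp [PySem.Set.update, List.foldl_cons, pv_add_mem hmem]
    · have hc : d.contains x = false := by
        rw [Bool.eq_false_iff]
        intro hcc
        exact hmem (hkeys ▸ (PySem.Dict.contains_iff_mem_keys d x).mp hcc)
      have hins : (d.insert x (0 : Int)).items = (S ++ [x]).map (fun k => (k, (0 : Int))) := by
        rw [PySem.Dict.items_insert_of_not_contains d 0 hc, hd]; simp
      have hS' : (S ++ [x]).Nodup := by
        simp [List.nodup_append, hS]
        intro a ha hax
        exact hmem (hax ▸ ha)
      rw [ih _ _ hins hS']
      congr 1
      simp [PySem.Set.update, List.foldl_cons, pv_add_not_mem hmem]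

theorem pv_w1_items (l : List Int) (d : PySem.Dict Int Int) (S : List Int) (f : Int → Int)
    (hd : d.items = S.map (fun k => (k, f k))) (hS : S.Nodup) (hl : ∀ x ∈ l, x ∈ S) :
    (l.foldl (fun d e => d.insert e (d.getD e 0 + 1)) d).items
      = S.map (fun k => (k, f k + (l.count k : Int))) := by
  induction l generalizing d f with
  | nil => simpa using hd
  | cons e t ih =>
    have hkeys : d.keys = S := by simp [PySem.Dict.keys, hd, Function.comp_def]
    have hnk : d.keys.Nodup := by rw [hkeys]; exact hS
    have heS : e ∈ S := hl e List.mem_cons_self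
    have hget : d.getD e 0 = f e :=
      PySem.Dict.getD_of_mem_items d (by rw [hd]; exact List.mem_map.mpr ⟨e, heS, rfl⟩) hnk 0
    have hc : d.contains e = true := by
      rw [PySem.Dict.contains_iff_mem_keys, hkeys]; exact heS
    have hins : (d.insert e (d.getD e 0 + 1)).items
        = S.map (fun k => (k, if k = e then f k + 1 else f k)) := by
      rw [PySem.Dict.items_insert_of_contains d _ hc, hd, List.map_map]
      refine List.map_congr_left ?_
      intro k hk
      by_cases hkx : k = e <;> simp [hkx, hget]
    simp only [List.foldl_cons]
    rw [ih _ _ hins (fun x hx => hl x (List.mem_cons_of_mem e hx))]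
    refine List.map_congr_left ?_
    intro k hk
    by_cases hkx : k = e
    · subst hkx
      simp only [List.count_cons, if_pos rfl, BEq.rfl]
      push_cast
      ring
    · have hke : (e == k) = false := by simp [Ne.symm hkx]
      simp [List.count_cons, hkx, hke]

theorem pv_w2_items (kl : List Int) (d : PySem.Dict Int Int) (hn : d.keys.Nodup) :
    (kl.foldl (fun d e => if d.getD e 0 == 0 then d.erase e else d) d).items
      = d.items.filter (fun p => !(decide (p.1 ∈ kl)) || !(p.2 == 0)) := by
  induction kl generalizing d hn with
  | nil => simp
  | cons e t ih =>
    have hval : ∀ p ∈ d.items, p.1 = e → p.2 = d.getD e 0 := by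
      intro p hp hpe
      have h1 : d.get? e = some p.2 := by
        have hm : (e, p.2) ∈ d.items := by rw [← hpe]; exact hp
        exact PySem.Dict.get?_of_mem_items d hm hn
      rw [PySem.Dict.getD_eq_get?_getD, h1]
      rfl
    simp only [List.foldl_cons]
    by_cases h0 : (d.getD e 0 == (0 : Int)) = true
    · rw [if_pos h0]
      have hsub : (d.erase e).keys.Nodup := by
        have hsl : (d.erase e).items.Sublist d.items := by
          rw [show (d.erase e).items = d.items.filter (fun p => !(p.1 == e)) from rfl]
          exact List.filter_sublist
        have hm := List.Sublist.map (fun p : Int × Int => p.1) hsl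
        simp only [PySem.Dict.keys] at *
        exact List.Nodup.sublist hm hn
      rw [ih _ hsub]
      rw [show (d.erase e).items = d.items.filter (fun p => !(p.1 == e)) from rfl]
      rw [List.filter_filter]
      refine List.filter_congr ?_
      intro p hp
      by_cases hpe : p.1 = e
      · have hz : p.2 = 0 := (hval p hp hpe).trans (eq_of_beq h0)
        simp [hpe, hz]
      · simp [hpe, List.mem_cons]
    · rw [if_neg h0]
      rw [ih _ hn]
      refine List.filter_congr ?_
      intro p hp
      by_cases hpe : p.1 = e
      · have hz : ¬ p.2 = 0 := by
          rw [hval p hp hpe]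
          intro hh
          exact h0 (by simp [hh])
        simp [hpe, hz, List.mem_cons]
      · simp [hpe, List.mem_cons]

theorem pv_pos_frozen (t : List Int) (v : Int → Int) (acc : PySem.Dict Int Int) (base : Int)
    (k : Int) (hk : k ∉ t) :
    ((t.foldl (fun st e => (st.1.insert e st.2, st.2 + v e)) (acc, base)).1).getD k 0
      = acc.getD k 0 := by
  induction t generalizing acc base with
  | nil => rfl
  | cons e r ih =>
    have hne : k ≠ e := fun h => hk (h ▸ List.mem_cons_self)
    simp only [List.foldl_cons]
    rw [ih _ _ (fun h => hk (List.mem_cons_of_mem e h))]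
    exact PySem.Dict.getD_insert_of_ne acc base 0 hne

theorem pv_pos_build (ks : List Int) (v : Int → Int) (acc : PySem.Dict Int Int) (base : Int)
    (hn : ks.Nodup) (k : Int) (hk : k ∈ ks) :
    ((ks.foldl (fun st e => (st.1.insert e st.2, st.2 + v e)) (acc, base)).1).getD k 0
      = base + pvIpos ks v k := by
  induction ks generalizing acc base with
  | nil => cases hk
  | cons h t ih =>
    simp only [List.foldl_cons]
    rcases List.mem_cons.mp hk with rfl | hkt
    · rw [pv_pos_frozen t v _ _ k (List.nodup_cons.mp hn).1]
      rw [PySem.Dict.getD_insert_self]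
      simp [pvIpos]
    · have hne : k ≠ h := by
        intro hh
        subst hh
        exact (List.nodup_cons.mp hn).1 hkt
      rw [ih _ _ (List.nodup_cons.mp hn).2 hkt]
      simp only [pvIpos, if_neg (Ne.symm hne)]
      ring

theorem pv_ipos_cast (ks : List Int) (v : Int → Int) (c : Int → Nat)
    (h : ∀ k ∈ ks, v k = (c k : Int)) (e : Int) :
    pvIpos ks v e = (pvStartpos ks c e : Int) := by
  induction ks with
  | nil => simp [pvIpos, pvStartpos]
  | cons k t ih =>
    by_cases hk : k = e
    · simp [pvIpos, pvStartpos, hk]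
    · simp only [pvIpos, pvStartpos, if_neg hk]
      rw [h k List.mem_cons_self, ih (fun a ha => h a (List.mem_cons_of_mem k ha))]
      push_cast
      ring

theorem pv_blockform_congr (ks : List Int) (c d d' : Int → Nat)
    (h : ∀ k ∈ ks, d k = d' k) : pvBlockform ks c d = pvBlockform ks c d' := by
  induction ks with
  | nil => rfl
  | cons k t ih =>
    simp only [pvBlockform, List.flatMap_cons]
    rw [h k List.mem_cons_self]
    have htail := ih (fun a ha => h a (List.mem_cons_of_mem k ha))
    simp only [pvBlockform] at htail
    rw [htail]

theorem pv_blockform_zero (ks : List Int) (c : Int → Nat) :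
    pvBlockform ks c (fun _ => 0) = List.replicate ((ks.map c).sum) (0 : Int) := by
  induction ks with
  | nil => rfl
  | cons k t ih =>
    simp only [pvBlockform, List.flatMap_cons]
    have ih' := ih
    simp only [pvBlockform] at ih'
    rw [ih']
    simp only [Nat.sub_zero, List.replicate_zero, List.nil_append, List.map_cons, List.sum_cons]
    rw [List.replicate_add]

theorem pv_sum_counts (l ks : List Int) (hn : ks.Nodup) (hl : ∀ x ∈ l, x ∈ ks) :
    (ks.map (fun k => l.count k)).sum = l.length := by
  induction ks generalizing l with
  | nil =>
    cases l with
    | nil => simp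
    | cons a r => exact absurd (hl a List.mem_cons_self) (by simp)
  | cons k t ih =>
    simp only [List.map_cons, List.sum_cons]
    have hkt : k ∉ t := (List.nodup_cons.mp hn).1
    have hnt : t.Nodup := (List.nodup_cons.mp hn).2
    have hmapeq : ∀ j ∈ t, l.count j = (l.filter (fun x => !(x == k))).count j := by
      intro j hj
      have hjk : j ≠ k := fun h => hkt (h ▸ hj)
      rw [List.count_filter (by simp [hjk])]
    have h2 : t.map (fun j => l.count j)
        = t.map (fun j => (l.filter (fun x => !(x == k))).count j) :=
      List.map_congr_left hmapeq
    rw [h2, ih (l.filter (fun x => !(x == k))) hnt ?memf]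
    case memf =>
      intro x hx
      have hx' := List.mem_filter.mp hx
      have hxk : x ≠ k := by simpa using hx'.2
      rcases List.mem_cons.mp (hl x hx'.1) with h | h
      · exact absurd h hxk
      · exact h
    have hsplit := List.length_eq_countP_add_countP (p := fun x => x == k) (l := l)
    have hcnt : l.count k = l.countP (fun x => x == k) := rfl
    have hflt : (l.filter (fun x => !(x == k))).length
        = l.countP (fun a => decide ¬((a == k) = true)) := by
      rw [← List.countP_eq_length_filter]
      exact List.countP_congr (fun a _ => by cases hx : (a == k) <;> simp [hx])
    omega

theorem pv_set_block (ks : List Int) (c d : Int → Nat) (e : Int)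
    (hn : ks.Nodup) (he : e ∈ ks) (hdc : ∀ k ∈ ks, d k ≤ c k) (hlt : d e < c e) :
    (pvBlockform ks c d).set (pvStartpos ks c e + d e) e
      = pvBlockform ks c (fun k => if k = e then d k + 1 else d k) := by
  induction ks with
  | nil => cases he
  | cons h t ih =>
    have hht : h ∉ t := (List.nodup_cons.mp hn).1
    have hnt : t.Nodup := (List.nodup_cons.mp hn).2
    simp only [pvBlockform, List.flatMap_cons, pvStartpos]
    by_cases hhe : h = e
    · subst hhe
      rw [if_pos rfl]
      have hdh : d h ≤ c h := hdc h List.mem_cons_self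
      rw [List.set_append,
        if_pos (by simp only [List.length_append, List.length_replicate]; omega)]
      congr 1
      · rw [List.set_append, if_neg (by simp)]
        have hidx : 0 + d h - (List.replicate (d h) h).length = 0 := by simp
        rw [hidx]
        have hrep : List.replicate (c h - d h) (0 : Int)
            = 0 :: List.replicate (c h - d h - 1) 0 := by
          have h3 : c h - d h = (c h - d h - 1) + 1 := by omega
          conv_lhs => rw [h3]
          rw [List.replicate_succ]
        rw [hrep, List.set_cons_zero]
        have h4 : c h - (d h + 1) = c h - d h - 1 := by omega
        simp [h4, List.replicate_succ', List.append_assoc]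
      · have hcg := pv_blockform_congr t c d (fun k => if k = h then d k + 1 else d k)
          (fun k hk => by
            have hne : k ≠ h := fun hh => hht (hh ▸ hk)
            simp [hne])
        simpa [pvBlockform] using hcg
    · rw [if_neg hhe]
      have hdh : d h ≤ c h := hdc h List.mem_cons_self
      have heT : e ∈ t := by
        rcases List.mem_cons.mp he with h' | h'
        · exact absurd h'.symm hhe
        · exact h'
      rw [List.set_append,
        if_neg (by simp only [List.length_append, List.length_replicate]; omega)]
      have hidx : c h + pvStartpos t c e + d e
          - (List.replicate (d h) h ++ List.replicate (c h - d h) (0 : Int)).length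
          = pvStartpos t c e + d e := by
        simp only [List.length_append, List.length_replicate]; omega
      rw [hidx]
      congr 1
      · simp [hhe]
      · have := ih hnt heT (fun k hk => hdc k (List.mem_cons_of_mem h hk))
        simpa [pvBlockform] using this

theorem pv_scatter (l ks : List Int) (c d : Int → Nat) (pos : PySem.Dict Int Int) (arr : List Int)
    (hn : ks.Nodup) (hl : ∀ x ∈ l, x ∈ ks)
    (hpos : ∀ k ∈ ks, pos.getD k 0 = (pvStartpos ks c k : Int) + (d k : Int))
    (hcnt : ∀ k ∈ ks, d k + l.count k = c k)
    (harr : arr = pvBlockform ks c d) :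
    (l.foldl (fun st e =>
        (PySem.List.pySetD st.1 (st.2.getD e 0) e, st.2.insert e (st.2.getD e 0 + 1))) (arr, pos)).1
      = pvBlockform ks c c := by
  induction l generalizing d pos arr with
  | nil =>
    simp only [List.foldl_nil]
    rw [harr]
    exact pv_blockform_congr ks c d c (fun k hk => by have := hcnt k hk; simpa using this)
  | cons e t ih =>
    have heks : e ∈ ks := hl e List.mem_cons_self
    have hde : d e < c e := by
      have h := hcnt e heks
      have : (e :: t).count e = t.count e + 1 := by simp [List.count_cons]
      omega
    have hdc : ∀ k ∈ ks, d k ≤ c k := fun k hk => by have := hcnt k hk; omega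
    have hg : pos.getD e 0 = ((pvStartpos ks c e + d e : Nat) : Int) := by
      rw [hpos e heks]; push_cast; ring
    simp only [List.foldl_cons]
    refine ih (fun k => if k = e then d k + 1 else d k)
      (pos.insert e (pos.getD e 0 + 1)) (PySem.List.pySetD arr (pos.getD e 0) e)
      (fun x hx => hl x (List.mem_cons_of_mem e hx)) ?_ ?_ ?_
    · intro k hk
      rw [PySem.Dict.getD_insert]
      dsimp only
      by_cases hke : k = e
      · subst hke
        rw [if_pos rfl, if_pos rfl, hg]
        push_cast
        ring
      · rw [if_neg hke, if_neg hke, hpos k hk]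
    · intro k hk
      dsimp only
      have h := hcnt k hk
      by_cases hke : k = e
      · subst hke
        have hcc : (k :: t).count k = t.count k + 1 := by simp
        rw [if_pos rfl]
        omega
      · have hek : (e == k) = false := by simp [Ne.symm hke]
        have hcc : (e :: t).count k = t.count k := by simp [List.count_cons, hek]
        rw [if_neg hke]
        omega
    · rw [hg, PySem.List.pySetD_natCast, harr]
      exact pv_set_block ks c d e hn heks hdc hde

theorem pv_emit (ks : List Int) (v : Int → Int) (out : List Int) :
    ks.foldl (fun out elem => out ++ List.replicate (v elem).toNat elem) out
      = out ++ ks.flatMap (fun k => List.replicate (v k).toNat k) := by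
  induction ks generalizing out with
  | nil => simp
  | cons k t ih =>
    simp only [List.foldl_cons, List.flatMap_cons]
    rw [ih]
    simp [List.append_assoc]

theorem pv_flatMap_congr (ks : List Int) (f g : Int → List Int) (h : ∀ k ∈ ks, f k = g k) :
    ks.flatMap f = ks.flatMap g := by
  induction ks with
  | nil => rfl
  | cons k t ih =>
    simp only [List.flatMap_cons]
    rw [h k List.mem_cons_self, ih (fun a ha => h a (List.mem_cons_of_mem k ha))]

theorem pv_w2_char (lista klucze : List Int) (h1 : ∀ x ∈ lista, x ∈ klucze) :
    (klucze.foldl (fun d e => if d.getD e 0 == 0 then d.erase e else d)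
        (lista.foldl (fun d e => d.insert e (d.getD e 0 + 1))
          (klucze.foldl (fun d x => d.insert x 0) (PySem.Dict.empty : PySem.Dict Int Int)))).items
      = ((PySem.Set.ofList klucze).filter (fun k => !((lista.count k : Int) == 0))).map
          (fun k => (k, (lista.count k : Int))) := by
  have Knodup : (PySem.Set.ofList klucze).Nodup := PySem.Set.nodup_ofList klucze
  have hw0 : (klucze.foldl (fun d x => d.insert x 0) (PySem.Dict.empty : PySem.Dict Int Int)).items
      = (PySem.Set.ofList klucze).map (fun k => (k, (0 : Int))) := by
    have h := pv_w0_items klucze PySem.Dict.empty [] rfl List.nodup_nil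
    rw [show PySem.Set.update ([] : List Int) klucze = PySem.Set.ofList klucze from rfl] at h
    exact h
  have hw1 : (lista.foldl (fun d e => d.insert e (d.getD e 0 + 1))
        (klucze.foldl (fun d x => d.insert x 0) (PySem.Dict.empty : PySem.Dict Int Int))).items
      = (PySem.Set.ofList klucze).map (fun k => (k, (lista.count k : Int))) := by
    have h := pv_w1_items lista _ (PySem.Set.ofList klucze) (fun _ => 0) hw0 Knodup
      (fun x hx => (PySem.Set.mem_ofList klucze x).mpr (h1 x hx))
    simpa using h
  have hw1keys : (lista.foldl (fun d e => d.insert e (d.getD e 0 + 1))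
        (klucze.foldl (fun d x => d.insert x 0) (PySem.Dict.empty : PySem.Dict Int Int))).keys
      = PySem.Set.ofList klucze := by
    simp only [PySem.Dict.keys]
    rw [hw1, List.map_map]
    simp [Function.comp_def]
  rw [pv_w2_items klucze _ (by rw [hw1keys]; exact Knodup), hw1, List.filter_map]
  refine congrArg _ (List.filter_congr ?_)
  intro k hk
  have hkk : k ∈ klucze := (PySem.Set.mem_ofList klucze k).mp hk
  simp [hkk]

theorem pv_w2keys_char (lista klucze : List Int) (h1 : ∀ x ∈ lista, x ∈ klucze) :
    (klucze.foldl (fun d e => if d.getD e 0 == 0 then d.erase e else d)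
        (lista.foldl (fun d e => d.insert e (d.getD e 0 + 1))
          (klucze.foldl (fun d x => d.insert x 0) (PySem.Dict.empty : PySem.Dict Int Int)))).keys
      = (PySem.Set.ofList klucze).filter (fun k => !((lista.count k : Int) == 0)) := by
  simp only [PySem.Dict.keys]
  rw [pv_w2_char lista klucze h1, List.map_map]
  simp [Function.comp_def]

theorem pv_ks_nodup (lista klucze : List Int) :
    ((PySem.Set.ofList klucze).filter (fun k => !((lista.count k : Int) == 0))).Nodup :=
  (PySem.Set.nodup_ofList klucze).filter _

theorem pv_w2getD_char (lista klucze : List Int) (h1 : ∀ x ∈ lista, x ∈ klucze) :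
    ∀ k ∈ (PySem.Set.ofList klucze).filter (fun k => !((lista.count k : Int) == 0)),
      (klucze.foldl (fun d e => if d.getD e 0 == 0 then d.erase e else d)
        (lista.foldl (fun d e => d.insert e (d.getD e 0 + 1))
          (klucze.foldl (fun d x => d.insert x 0) (PySem.Dict.empty : PySem.Dict Int Int)))).getD k 0
      = (lista.count k : Int) := by
  intro k hk
  exact PySem.Dict.getD_of_mem_items _
    (by rw [pv_w2_char lista klucze h1]; exact List.mem_map.mpr ⟨k, hk, rfl⟩)
    (by rw [pv_w2keys_char lista klucze h1]; exact pv_ks_nodup lista klucze) 0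

theorem pv_A_eq (lista klucze : List Int) (h1 : ∀ x ∈ lista, x ∈ klucze) :
    sortowanie_zliczanie lista klucze
      = ((PySem.Set.ofList klucze).filter (fun k => !((lista.count k : Int) == 0))).flatMap
          (fun k => List.replicate (lista.count k) k) := by
  have ksNodup := pv_ks_nodup lista klucze
  have hlks : ∀ x ∈ lista, x ∈ (PySem.Set.ofList klucze).filter (fun k => !((lista.count k : Int) == 0)) := by
    intro x hx
    refine List.mem_filter.mpr ⟨(PySem.Set.mem_ofList klucze x).mpr (h1 x hx), ?_⟩
    have hpos : 0 < lista.count x := List.count_pos_iff.mpr hx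
    have hzz : lista.count x ≠ 0 := by omega
    simp [hzz]
  simp only [sortowanie_zliczanie]
  rw [pv_w2keys_char lista klucze h1]
  have hbc : pvBlockform ((PySem.Set.ofList klucze).filter (fun k => !((lista.count k : Int) == 0)))
        (fun k => lista.count k) (fun k => lista.count k)
      = ((PySem.Set.ofList klucze).filter (fun k => !((lista.count k : Int) == 0))).flatMap
          (fun k => List.replicate (lista.count k) k) := by
    simp [pvBlockform]
  rw [← hbc]
  refine pv_scatter lista _ (fun k => lista.count k) (fun _ => 0) _ _ ksNodup hlks ?_ ?_ ?_
  · intro k hk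
    rw [pv_pos_build _ (fun e =>
        (klucze.foldl (fun d e => if d.getD e 0 == 0 then d.erase e else d)
          (lista.foldl (fun d e => d.insert e (d.getD e 0 + 1))
            (klucze.foldl (fun d x => d.insert x 0) (PySem.Dict.empty : PySem.Dict Int Int)))).getD e 0)
      _ _ ksNodup k hk]
    rw [pv_ipos_cast _ _ (fun k => lista.count k) (fun j hj => pv_w2getD_char lista klucze h1 j hj) k]
    push_cast
    ring
  · intro k _
    exact Nat.zero_add _
  · rw [pv_blockform_zero, pv_sum_counts lista _ ksNodup hlks, PySem.List.pyRange_zero_natCast]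
    simp [Function.comp_def, List.map_const']

theorem pv_B_eq (lista klucze : List Int) (h1 : ∀ x ∈ lista, x ∈ klucze) :
    sortowanie_zliczanie_alt lista klucze
      = ((PySem.Set.ofList klucze).filter (fun k => !((lista.count k : Int) == 0))).flatMap
          (fun k => List.replicate (lista.count k) k) := by
  simp only [sortowanie_zliczanie_alt]
  rw [pv_w2keys_char lista klucze h1]
  rw [pv_emit]
  simp only [List.nil_append]
  refine pv_flatMap_congr _ _ _ ?_
  intro k hk
  rw [pv_w2getD_char lista klucze h1 k hk]
  simp

-- ===== VERDICT (by name: the statement is the Claim_ definition above) =====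
theorem sortowanie_zliczanie_spec : Claim_equal_sortowanie_zliczanie := by
  intro lista klucze _ hpre
  unfold Spec_sortowanie_zliczanie
  rw [pv_A_eq lista klucze hpre.1, pv_B_eq lista klucze hpre.1]
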